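-- pv_equiv track=rewrite | github.com/primrose101/CS322 | finite_state_machines/keywords.py | kwstring_fsm
-- ===== SOURCE A (Python) =====
-- def kwstring_fsm(string_input, index):
--     i = index
--
--     table = [
--         [1, 7, 7, 7, 7, 7, 7],
--         [7, 2, 7, 7, 7, 7, 7],
--         [7, 7, 3, 7, 7, 7, 7],
--         [7, 7, 7, 4, 7, 7, 7],
--         [7, 7, 7, 7, 5, 7, 7],
--         [7, 7, 7, 7, 7, 6, 7],
--         [7, 7, 7, 7, 7, 7, 7],
--         [7, 7, 7, 7, 7, 7, 7],
--     ]
--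
--     state = 0
--     inputstate = 0
--
--     string_length = len(string_input)
--
--     while i != string_length:
--         if string_input[i] == 'S':
--             inputstate = 0
--         elif string_input[i] == 'T':
--             inputstate = 1
--         elif string_input[i] == 'R':
--             inputstate = 2
--         elif string_input[i] == 'I':
--             inputstate = 3
--         elif string_input[i] == 'N':
--             inputstate = 4
--         elif string_input[i] == 'G':
--             inputstate = 5
--         else:
--             inputstate = 6
--
--         state = table[state][inputstate]
--
--         if state == 7:
--             break
--
--         i += 1
--
--     return i - index
-- ===== SOURCE B (Python) =====
-- KEYWORD = "STRING"
--
-- def kwstring_fsm(string_input, index):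
--     n = len(string_input)
--     i = index
--     while i != n and i - index < 6:
--         if string_input[i] != KEYWORD[i - index]:
--             break
--         i += 1
--     return i - index
-- ===== Notes on version B (the rewrite author's own statement) =====
-- stated objective: simpler
-- what changed: Replaces the 8x7 transition table and the state/inputstate machine with a direct positional comparison of string_input[i] against the literal keyword "STRING", stopping after 6 matched characters.
import Mathlib
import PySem

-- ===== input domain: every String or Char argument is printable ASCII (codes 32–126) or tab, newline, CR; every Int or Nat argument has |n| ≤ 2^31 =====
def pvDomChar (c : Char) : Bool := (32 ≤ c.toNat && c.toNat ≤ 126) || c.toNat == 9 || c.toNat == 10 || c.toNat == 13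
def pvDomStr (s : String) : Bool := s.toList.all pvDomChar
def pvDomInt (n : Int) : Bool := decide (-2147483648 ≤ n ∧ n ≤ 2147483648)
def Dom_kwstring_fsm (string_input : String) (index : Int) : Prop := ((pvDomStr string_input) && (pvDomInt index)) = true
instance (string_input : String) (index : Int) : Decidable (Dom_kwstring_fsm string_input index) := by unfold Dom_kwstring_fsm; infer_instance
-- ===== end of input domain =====

-- B replaces A's 8x7 transition table and state/inputstate machinery by a direct
-- character comparison against the literal keyword "STRING" (objective: simpler).

-- ===== PORT A =====
def kwATable : List (List Int) :=
  [[1, 7, 7, 7, 7, 7, 7],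
   [7, 2, 7, 7, 7, 7, 7],
   [7, 7, 3, 7, 7, 7, 7],
   [7, 7, 7, 4, 7, 7, 7],
   [7, 7, 7, 7, 5, 7, 7],
   [7, 7, 7, 7, 7, 6, 7],
   [7, 7, 7, 7, 7, 7, 7],
   [7, 7, 7, 7, 7, 7, 7]]

-- the elif chain computing inputstate
def kwAInput (c : Char) : Int :=
  if c = 'S' then 0
  else if c = 'T' then 1
  else if c = 'R' then 2
  else if c = 'I' then 3
  else if c = 'N' then 4
  else if c = 'G' then 5
  else 6

-- the while loop of A; returns the final i.  `none` from pyGet? is Python's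
-- IndexError (excluded by Pre_); the table indices are always in range here,
-- so the `.getD 7` default is unreachable.
def kwALoop (s : List Char) (state i : Int) : Int :=
  if i = PySem.List.len s then i
  else
    match h : PySem.List.pyGet? s i with
    | none => i
    | some c =>
      let st := ((PySem.List.pyGet? kwATable state).bind
                   (fun row => PySem.List.pyGet? row (kwAInput c))).getD 7
      if st = 7 then i else kwALoop s st (i + 1)
termination_by (PySem.List.len s - i).toNat
decreasing_by
  have hr : PySem.Raise.InRange s.length i := by
    by_contra hcon
    rw [← PySem.List.pyGet?_eq_none_iff] at hcon
    simp [h] at hcon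
  unfold PySem.Raise.InRange at hr
  simp [PySem.List.len] at *
  omega

def kwstring_fsm (string_input : String) (index : Int) : Int :=
  kwALoop string_input.toList 0 index - index

-- ===== PORT B =====
def kwKeyword : List Char := ['S', 'T', 'R', 'I', 'N', 'G']

-- while i != n and i - index < 6: break on mismatch with KEYWORD[i-index].
-- `none` on s is Python's IndexError (excluded by Pre_); the kwKeyword index
-- is always in range, its `none` arm is unreachable.
def kwBLoop (s : List Char) (index i : Int) : Int :=
  if i = PySem.List.len s then i
  else if 6 ≤ i - index then i
  else
    match h : PySem.List.pyGet? s i with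
    | none => i
    | some c =>
      match PySem.List.pyGet? kwKeyword (i - index) with
      | none => i
      | some k => if c ≠ k then i else kwBLoop s index (i + 1)
termination_by (PySem.List.len s - i).toNat
decreasing_by
  have hr : PySem.Raise.InRange s.length i := by
    by_contra hcon
    rw [← PySem.List.pyGet?_eq_none_iff] at hcon
    simp [h] at hcon
  unfold PySem.Raise.InRange at hr
  simp [PySem.List.len] at *
  omega

def kwstring_fsm_alt (string_input : String) (index : Int) : Int :=
  kwBLoop string_input.toList index index - index

-- ===== PRECONDITION & SPEC =====
-- Pre_ excludes exactly the inputs where Python A raises IndexError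
-- (index below -len(s) or above len(s)); Python B raises there too.
def Pre_kwstring_fsm (string_input : String) (index : Int) : Prop :=
  -(string_input.toList.length : Int) ≤ index ∧ index ≤ (string_input.toList.length : Int)
instance (string_input : String) (index : Int) : Decidable (Pre_kwstring_fsm string_input index) := by
  unfold Pre_kwstring_fsm; infer_instance

def pvWitness_kwstring_fsm : String × Int := ("STRINGS", 0)

def Spec_kwstring_fsm (string_input : String) (index : Int) (out : Int) : Prop := out = kwstring_fsm_alt string_input index
instance (string_input : String) (index : Int) (out : Int) : Decidable (Spec_kwstring_fsm string_input index out) := by unfold Spec_kwstring_fsm; infer_instance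

-- ===== CLAIM (what is proved, stated in full; the proofs are below) =====
def Claim_equal_kwstring_fsm : Prop := ∀ (string_input : String) (index : Int), Dom_kwstring_fsm string_input index → Pre_kwstring_fsm string_input index → Spec_kwstring_fsm string_input index (kwstring_fsm string_input index)

-- ===== LEMMAS AND PROOFS =====

-- one transition of A's table equals a comparison against the keyword character
set_option maxHeartbeats 2000000 in
lemma kw_step (k : Int) (hk0 : 0 ≤ k) (hk6 : k < 6) (c : Char) :
    ((PySem.List.pyGet? kwATable k).bind
       (fun row => PySem.List.pyGet? row (kwAInput c))).getD 7
      = if PySem.List.pyGet? kwKeyword k = some c then k + 1 else 7 := by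
  interval_cases k <;> unfold kwAInput <;> split_ifs <;>
    simp_all [kwATable, kwKeyword, PySem.List.pyGet?, PySem.List.pyIdx?] <;>
    (rename_i hx; exact absurd hx.symm (by assumption))

-- at state 6 the table sends every input character to 7
lemma kw_step6 (c : Char) :
    ((PySem.List.pyGet? kwATable 6).bind
       (fun row => PySem.List.pyGet? row (kwAInput c))).getD 7 = 7 := by
  unfold kwAInput; split_ifs <;> decide

-- the two loops agree while the matched count i - index stays in [0, 6]
lemma kw_loop_eq (s : List Char) (index i : Int)
    (hk0 : 0 ≤ i - index) (hk6 : i - index ≤ 6) (hi : i ≤ PySem.List.len s) :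
    kwALoop s (i - index) i = kwBLoop s index i := by
  rw [kwALoop, kwBLoop]
  by_cases hn : i = PySem.List.len s
  · simp [hn]
  · simp only [hn, if_false]
    rcases hg : PySem.List.pyGet? s i with _ | c
    · by_cases h6 : 6 ≤ i - index <;> simp [h6]
    · have hlt : i < PySem.List.len s := by
        have hr : PySem.Raise.InRange s.length i := by
          by_contra hcon
          rw [← PySem.List.pyGet?_eq_none_iff] at hcon
          simp [hg] at hcon
        unfold PySem.Raise.InRange at hr
        simp [PySem.List.len] at *
        omega
      by_cases h6 : 6 ≤ i - index
      · -- matched count is 6: A reads one more char, the table sends it to 7,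
        -- so A breaks and both sides return i
        have hk : i - index = 6 := by omega
        rw [hk]
        simp [kw_step6]
      · simp only [h6, if_false]
        rw [kw_step (i - index) hk0 (by omega)]
        rcases hkw : PySem.List.pyGet? kwKeyword (i - index) with _ | k
        · exfalso
          have := (PySem.List.pyGet?_eq_none_iff (xs := kwKeyword) (i := i - index)).mp hkw
          exact this (by unfold PySem.Raise.InRange kwKeyword; simp; omega)
        · by_cases hc : k = c
          · subst hc
            have h7 : i - index + 1 ≠ 7 := by omega
            simp only [if_true, ne_eq, not_true_eq_false, if_false]
            rw [if_neg h7]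
            have harg : i - index + 1 = i + 1 - index := by omega
            rw [harg]
            exact kw_loop_eq s index (i + 1) (by omega) (by omega)
              (by simp [PySem.List.len] at *; omega)
          · have hne : (some k : Option Char) ≠ some c := by simp [hc]
            rw [if_neg hne, if_pos rfl]
            show i = if c ≠ k then i else kwBLoop s index (i + 1)
            rw [if_pos (show c ≠ k from fun h => hc h.symm)]
termination_by (PySem.List.len s - i).toNat
decreasing_by simp [PySem.List.len] at *; omega

-- ===== VERDICT (by name: the statement is the Claim_ definition above) =====
theorem kwstring_fsm_spec : Claim_equal_kwstring_fsm := by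
  intro s index _ hpre
  unfold Spec_kwstring_fsm kwstring_fsm kwstring_fsm_alt
  have h := kw_loop_eq s.toList index index (by omega) (by omega)
    (by simp [PySem.List.len]; exact hpre.2)
  simpa using congrArg (fun x => x - index) (by simpa using h)
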